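-- pv_equiv track=rewrite | github.com/eurquhart1/opentitan | hw/ip/otbn/dv/otbnsim/test/ntt_vectors_test.py | generate_256bit_hex_strings
-- ===== SOURCE A (Python) =====
-- def generate_256bit_hex_strings(values):
--     """
--     Takes a list of 16-bit values and groups them into 256-bit hex strings,
--     ensuring little endian format. Each 256-bit hex string represents 16 of the 16-bit values.
--     """
--     # Ensure the number of values is a multiple of 16, pad with zeros if necessary
--     while len(values) % 16 != 0:
--         values.append(0)
--
--     res = []
--
--     # Process each group of 16 16-bit values
--     for i in range(0, len(values), 16):
--         vals = []
--         # Convert to two's complement if negative, then ensure it's confined to 16 bits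
--         for idx in range(16):
--             vals.append(values[i+idx] & 0xFFFF)
--             if values[i+idx] < 0:
--                 vals[idx] = ((~(-values[i+idx]) + 1) & 0xFFFF)
--
--         # Combine the two 16-bit values into a single 32-bit value
--         combined_val = 0
--
--         for j in range(16):
--             combined_val |= (vals[j] << 16*j)
--
--         res.append(hex(combined_val))
--
--     return res
-- ===== SOURCE B (Python) =====
-- def generate_256bit_hex_strings(values):
--     """Build each 256-bit hex string textually: format every 16-bit word as 4 hex
--     digits, concatenate the chunk in reverse (little-endian), strip leading zeros."""
--     # Same in-place padding as the original (caller-visible mutation preserved).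
--     while len(values) % 16 != 0:
--         values.append(0)
--     res = []
--     for i in range(0, len(values), 16):
--         digits = ''.join(format(v & 0xFFFF, '04x') for v in reversed(values[i:i + 16]))
--         res.append('0x' + (digits.lstrip('0') or '0'))
--     return res
-- ===== Notes on version B (the rewrite author's own statement) =====
-- stated objective: alternative
-- what changed: B never constructs the 256-bit integer: each masked word is formatted as a fixed 4-digit hex string, the 16 strings of a chunk are concatenated in reverse order (little-endian) and leading zeros are stripped, replacing A's shift/OR big-integer accumulator plus hex() and its redundant two's-complement branch.
import Mathlib
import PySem

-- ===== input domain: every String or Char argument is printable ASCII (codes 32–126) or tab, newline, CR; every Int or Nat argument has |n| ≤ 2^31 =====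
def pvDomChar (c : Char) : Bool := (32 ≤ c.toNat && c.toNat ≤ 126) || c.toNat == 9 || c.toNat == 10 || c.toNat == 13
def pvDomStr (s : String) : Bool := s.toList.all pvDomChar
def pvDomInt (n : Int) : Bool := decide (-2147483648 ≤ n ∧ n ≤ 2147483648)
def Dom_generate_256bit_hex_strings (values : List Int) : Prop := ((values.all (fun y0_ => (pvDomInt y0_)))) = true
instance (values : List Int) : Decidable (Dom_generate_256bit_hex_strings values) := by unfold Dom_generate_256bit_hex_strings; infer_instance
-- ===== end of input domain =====

-- B builds each 256-bit hex string textually — every masked word formatted as 4 hex digits,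
-- chunk concatenated in reverse (little-endian) and leading zeros stripped — instead of A's
-- shift/OR big-integer accumulator plus hex(); alternative algorithm, same return values.
-- Both A and B pad the ARGUMENT list in place in Python (same loop); the equivalence proved
-- here is about the return value.

-- ===== shared helpers =====

def pvHexDigit (n : Nat) : Char := if n < 10 then Char.ofNat (48 + n) else Char.ofNat (87 + n)

-- Python's hex(n) for a NONNEGATIVE int (A calls hex() only on values ≥ 0 here):
-- digit-emitting loop, structurally recursive on a fuel that dominates the digit count
def pvHexCharsGo : Nat → Nat → List Char
  | 0, _ => []
  | f + 1, n => if n = 0 then [] else pvHexCharsGo f (n / 16) ++ [pvHexDigit (n % 16)]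

def pvHexChars (n : Nat) : List Char := pvHexCharsGo n n

def pvHex (n : Int) : String :=
  String.ofList ('0' :: 'x' :: (if n.toNat = 0 then ['0'] else pvHexChars n.toNat))

-- `while len(values) % 16 != 0: values.append(0)` (identical line in A and in B)
def pad16Go : Nat → List Int → List Int
  | 0, vs => vs
  | f + 1, vs => if vs.length % 16 = 0 then vs else pad16Go f (vs ++ [0])

def pad16 (vs : List Int) : List Int := pad16Go 16 vs  -- ≤ 15 appends ever happen

-- fixed-width hex: k hexadecimal digits of n, most significant first
def pvPadHex : Nat → Nat → List Char
  | 0, _ => []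
  | k + 1, n => pvPadHex k (n / 16) ++ [pvHexDigit (n % 16)]

-- Python's format(m, '04x'): exact for 0 ≤ m < 65536 (B only calls it on v & 0xFFFF)
def pvFmt04x (m : Int) : List Char := pvPadHex 4 m.toNat

-- ===== PORT A =====
def generate_256bit_hex_strings (values : List Int) : List String :=
  let values := pad16 values
  let res : List String := []
  (PySem.List.pyRange 0 (values.length : Int) 16).foldl (fun res i =>
    -- vals.append(values[i+idx] & 0xFFFF); if negative, vals[idx] = (~(-v) + 1) & 0xFFFF
    let vals : List Int := []
    let vals := (PySem.List.pyRange 0 16 1).foldl (fun vals idx =>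
      let v := PySem.List.pyGetD values (i + idx) 0   -- values[i+idx]: always in range after padding
      let vals := vals ++ [PySem.Int.band v 65535]
      if v < 0 then vals.set idx.toNat (PySem.Int.band (Int.not (-v) + 1) 65535) else vals) vals
    let combined := (PySem.List.pyRange 0 16 1).foldl (fun combined j =>
      PySem.Int.bor combined (PySem.List.pyGetD vals j 0 <<< (16 * j).toNat)) 0
    res ++ [pvHex combined]) res

-- ===== PORT B =====
def generate_256bit_hex_strings_alt (values : List Int) : List String :=
  let values := pad16 values
  (PySem.List.pyRange 0 (values.length : Int) 16).map (fun i =>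
    -- digits = ''.join(format(v & 0xFFFF, '04x') for v in reversed(values[i:i+16]))
    let digits : List Char := ((PySem.List.slice values (some i) (some (i + 16))).reverse.map
      (fun v => pvFmt04x (PySem.Int.band v 65535))).flatten
    -- '0x' + (digits.lstrip('0') or '0')
    let stripped := digits.dropWhile (fun c => c == '0')
    String.ofList ('0' :: 'x' :: (if stripped.isEmpty then ['0'] else stripped)))

-- ===== PRECONDITION & SPEC =====
def Spec_generate_256bit_hex_strings (values : List Int) (out : List String) : Prop := out = generate_256bit_hex_strings_alt values
instance (values : List Int) (out : List String) : Decidable (Spec_generate_256bit_hex_strings values out) := by unfold Spec_generate_256bit_hex_strings; infer_instance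

-- ===== CLAIM (what is proved, stated in full; the proofs are below) =====
def Claim_equal_generate_256bit_hex_strings : Prop := ∀ (values : List Int), Dom_generate_256bit_hex_strings values → Spec_generate_256bit_hex_strings values (generate_256bit_hex_strings values)

-- ===== LEMMAS AND PROOFS =====

-- Python's ~x on Int
lemma pv_int_not_eq (x : Int) : Int.not x = -x - 1 := by
  cases x with
  | ofNat n => simp [Int.not, Int.negSucc_eq]; ring
  | negSucc n => simp [Int.not, Int.negSucc_eq]

-- bounds of v & 0xFFFF
lemma pv_band_bounds (v : Int) : 0 ≤ PySem.Int.band v 65535 ∧ PySem.Int.band v 65535 < 65536 := by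
  by_cases hv : 0 ≤ v
  · simp only [PySem.Int.band, if_pos hv, if_pos (by norm_num : (0:Int) ≤ 65535)]
    have h := Nat.and_le_right (n := v.toNat) (m := (65535 : Int).toNat)
    constructor
    · positivity
    · exact_mod_cast Nat.lt_succ_of_le h
  · simp only [PySem.Int.band, if_neg hv, if_pos (by norm_num : (0:Int) ≤ 65535)]
    have h := Nat.sub_le ((65535 : Int).toNat) ((65535 : Int).toNat &&& (-v - 1).toNat)
    constructor
    · positivity
    · exact_mod_cast Nat.lt_succ_of_le h

-- a ||| (b <<< k) = b <<< k + a when a < 2^k (Nat)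
lemma pv_nat_lor_shl (a b k : Nat) (h : a < 2 ^ k) : a ||| b <<< k = b <<< k + a := by
  apply Nat.eq_of_testBit_eq
  intro i
  rw [Nat.testBit_lor, Nat.testBit_shiftLeft, Nat.shiftLeft_eq, Nat.mul_comm b,
      Nat.testBit_two_pow_mul_add b h i]
  by_cases hik : i < k
  · simp [hik, Nat.not_le.mpr hik]
  · simp [hik, Nat.le_of_not_lt hik,
      Nat.testBit_lt_two_pow (lt_of_lt_of_le h (Nat.pow_le_pow_right (by norm_num) (Nat.le_of_not_lt hik)))]

-- disjoint-bits OR is addition (Int, nonneg operands)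
lemma pv_bor_shift_add (a m : Int) (k : Nat) (ha : 0 ≤ a) (hm : 0 ≤ m) (hlt : a < 2 ^ k) :
    PySem.Int.bor a (m <<< k) = a + m * 2 ^ k := by
  have hcast : ((2 ^ k : Nat) : Int) = 2 ^ k := by push_cast; ring
  have hs : m <<< k = m * 2 ^ k := Int.shiftLeft_eq m k
  have hmk : 0 ≤ m * 2 ^ k := by positivity
  rw [hs, PySem.Int.bor_of_nonneg ha hmk]
  have htn2 : ((2 : Int) ^ k).toNat = 2 ^ k := by rw [← hcast, Int.toNat_natCast]
  have han : a.toNat < 2 ^ k := by omega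
  rw [Int.toNat_mul hm (by positivity : (0:Int) ≤ 2 ^ k), htn2, ← Nat.shiftLeft_eq, pv_nat_lor_shl _ _ _ han, Nat.shiftLeft_eq]
  push_cast [Int.toNat_of_nonneg ha, Int.toNat_of_nonneg hm]
  ring

-- little-endian value of a list of 16-bit words (Int)
def packVal : List Int → Int
  | [] => 0
  | m :: t => m + 65536 * packVal t

-- little-endian value of a list of 16-bit words (Nat)
def packN : List Nat → Nat
  | [] => 0
  | m :: t => m + 65536 * packN t

lemma pv_packVal_toNat (ms : List Int) (h : ∀ m ∈ ms, 0 ≤ m) :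
    packVal ms = ((packN (ms.map Int.toNat) : Nat) : Int) := by
  induction ms with
  | nil => simp [packVal, packN]
  | cons m t ih =>
    simp only [packVal, List.map_cons, packN]
    rw [ih (fun x hx => h x (List.mem_cons_of_mem _ hx))]
    have := h m (List.mem_cons_self)
    push_cast
    rw [Int.toNat_of_nonneg this]

lemma pv_packN_lt (ms : List Nat) (h : ∀ m ∈ ms, m < 65536) :
    packN ms < 65536 ^ ms.length := by
  induction ms with
  | nil => simp [packN]
  | cons m t ih =>
    simp only [packN, List.length_cons]
    have h1 := h m (List.mem_cons_self)
    have h2 := ih (fun x hx => h x (List.mem_cons_of_mem _ hx))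
    have : (65536 : Nat) ^ (t.length + 1) = 65536 * 65536 ^ t.length := by ring
    rw [this]
    nlinarith

-- A's inner masking loop produces exactly the masked chunk
lemma pv_innerA (L : List Int) (i : Int) :
    ∀ (fuel n : Nat) (acc : List Int), n + fuel = 16 → acc.length = n →
    (PySem.List.pyRange (n : Int) 16 1).foldl
      (fun vals idx =>
        let v := PySem.List.pyGetD L (i + idx) 0
        let vals := vals ++ [PySem.Int.band v 65535]
        if v < 0 then vals.set idx.toNat (PySem.Int.band (Int.not (-v) + 1) 65535) else vals) acc
    = acc ++ (PySem.List.pyRange (n : Int) 16 1).map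
        (fun idx => PySem.Int.band (PySem.List.pyGetD L (i + idx) 0) 65535) := by
  intro fuel
  induction fuel with
  | zero =>
    intro n acc hn _
    have : n = 16 := by omega
    subst this
    norm_num [show PySem.List.pyRange (16 : Int) 16 1 = [] from rfl]
  | succ f ih =>
    intro n acc hn hlen
    have hlt : (n : Int) < 16 := by exact_mod_cast (by omega : n < 16)
    rw [PySem.List.pyRange_one_cons hlt]
    simp only [List.foldl_cons, List.map_cons]
    have hstep :
        (let v := PySem.List.pyGetD L (i + (n : Int)) 0
         let vals := acc ++ [PySem.Int.band v 65535]
         if v < 0 then vals.set (n : Int).toNat (PySem.Int.band (Int.not (-v) + 1) 65535) else vals)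
        = acc ++ [PySem.Int.band (PySem.List.pyGetD L (i + (n : Int)) 0) 65535] := by
      set v := PySem.List.pyGetD L (i + (n : Int)) 0 with hv
      by_cases hneg : v < 0
      · simp only [hneg, if_true]
        have hnot : Int.not (-v) + 1 = v := by rw [pv_int_not_eq]; ring
        rw [hnot]
        have : ((n : Int)).toNat = acc.length := by simp [hlen]
        rw [this]
        simp
      · simp [hneg]
    rw [hstep]
    have hcast : ((n : Int) + 1) = ((n + 1 : Nat) : Int) := by push_cast; ring
    rw [hcast, ih (n + 1) _ (by omega) (by simp [hlen])]
    simp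

-- A's OR/shift accumulator computes the little-endian pack of the word list
lemma pv_borfoldA (ms : List Int) (hms : ms.length = 16)
    (hb : ∀ m ∈ ms, 0 ≤ m ∧ m < 65536) :
    ∀ (fuel n : Nat) (acc : Int), n + fuel = 16 → 0 ≤ acc → acc < 65536 ^ n →
    (PySem.List.pyRange (n : Int) 16 1).foldl
      (fun combined j => PySem.Int.bor combined (PySem.List.pyGetD ms j 0 <<< (16 * j).toNat)) acc
    = acc + 65536 ^ n * packVal (ms.drop n) := by
  intro fuel
  induction fuel with
  | zero =>
    intro n acc hn _ _
    have : n = 16 := by omega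
    subst this
    norm_num [show PySem.List.pyRange (16 : Int) 16 1 = [] from rfl,
              show ms.drop 16 = [] from List.drop_eq_nil_of_le (by omega), packVal]
  | succ f ih =>
    intro n acc hn hacc0 haccb
    have hnlt : n < 16 := by omega
    have hlt : (n : Int) < 16 := by exact_mod_cast hnlt
    rw [PySem.List.pyRange_one_cons hlt]
    simp only [List.foldl_cons]
    have hn' : n < ms.length := by omega
    have hget : PySem.List.pyGetD ms (n : Int) 0 = ms[n] := by
      rw [PySem.List.pyGetD_eq_getElem ms 0 (by positivity) (by exact_mod_cast hn')]
      simp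
    have hmbound := hb ms[n] (List.getElem_mem hn')
    have htonat : ((16 : Int) * (n : Int)).toNat = 16 * n := by omega
    have hpow : (65536 : Int) ^ n = 2 ^ (16 * n) := by
      rw [show (65536 : Int) = 2 ^ 16 by norm_num, ← pow_mul]
    have hstep : PySem.Int.bor acc (PySem.List.pyGetD ms (n : Int) 0 <<< ((16 : Int) * (n : Int)).toNat)
        = acc + ms[n] * 65536 ^ n := by
      rw [hget, htonat, hpow]
      exact pv_bor_shift_add acc ms[n] (16 * n) hacc0 hmbound.1 (by rw [← hpow]; exact haccb)
    rw [hstep]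
    have hcast : ((n : Int) + 1) = ((n + 1 : Nat) : Int) := by push_cast; ring
    have hacc0' : 0 ≤ acc + ms[n] * 65536 ^ n := by
      have : (0:Int) ≤ ms[n] * 65536 ^ n := by have := hmbound.1; positivity
      omega
    have haccb' : acc + ms[n] * 65536 ^ n < 65536 ^ (n + 1) := by
      have h1 : ms[n] * 65536 ^ n ≤ 65535 * 65536 ^ n := by
        have := hmbound.2
        have hp : (0:Int) < 65536 ^ n := by positivity
        nlinarith
      have : (65536 : Int) ^ (n + 1) = 65536 * 65536 ^ n := by ring
      nlinarith [haccb]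
    rw [hcast, ih (n + 1) _ (by omega) hacc0' haccb']
    rw [List.drop_eq_getElem_cons hn', packVal]
    ring

-- values[i:i+16] written by index
lemma pv_slice_chunk (L : List Int) (i : Int) (h0 : 0 ≤ i) (h16 : i.toNat + 16 ≤ L.length) :
    ∀ (fuel n : Nat), n + fuel = 16 →
    (PySem.List.pyRange (n : Int) 16 1).map (fun idx => PySem.List.pyGetD L (i + idx) 0)
    = (L.drop (i.toNat + n)).take (16 - n) := by
  intro fuel
  induction fuel with
  | zero =>
    intro n hn
    have : n = 16 := by omega
    subst this
    norm_num [show PySem.List.pyRange (16 : Int) 16 1 = [] from rfl]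
  | succ f ih =>
    intro n hn
    have hnlt : n < 16 := by omega
    have hlt : (n : Int) < 16 := by exact_mod_cast hnlt
    rw [PySem.List.pyRange_one_cons hlt]
    simp only [List.map_cons]
    have hidx : i.toNat + n < L.length := by omega
    have hget : PySem.List.pyGetD L (i + (n : Int)) 0 = L[i.toNat + n] := by
      rw [PySem.List.pyGetD_eq_getElem L 0 (by omega) (by exact_mod_cast (by omega : i + (n:Int) < (L.length : Int)))]
      congr 1
      omega
    have hcast : ((n : Int) + 1) = ((n + 1 : Nat) : Int) := by push_cast; ring
    rw [hget, hcast, ih (n + 1) (by omega)]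
    rw [List.drop_eq_getElem_cons hidx]
    have h16n : 16 - n = (16 - (n + 1)) + 1 := by omega
    rw [h16n, List.take_succ_cons]
    congr 2

-- the padded list has length ≡ 0 (mod 16)
lemma pv_pad16Go_mod : ∀ (f : Nat) (vs : List Int),
    (16 - vs.length % 16) % 16 ≤ f → (pad16Go f vs).length % 16 = 0 := by
  intro f
  induction f with
  | zero =>
    intro vs h
    simp only [pad16Go]
    omega
  | succ f ih =>
    intro vs h
    simp only [pad16Go]
    by_cases h0 : vs.length % 16 = 0
    · simp [h0]
    · rw [if_neg h0]
      exact ih (vs ++ [0]) (by simp only [List.length_append, List.length_cons, List.length_nil]; omega)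

lemma pv_pad16_mod (vs : List Int) : (pad16 vs).length % 16 = 0 :=
  pv_pad16Go_mod 16 vs (by omega)

-- ===== hex-string lemmas =====

lemma pv_go_fuel : ∀ (f₁ : Nat), ∀ (f₂ n : Nat), n ≤ f₁ → n ≤ f₂ →
    pvHexCharsGo f₁ n = pvHexCharsGo f₂ n := by
  intro f₁
  induction f₁ with
  | zero =>
    intro f₂ n h1 _
    have : n = 0 := by omega
    subst this
    cases f₂ <;> simp [pvHexCharsGo]
  | succ f ih =>
    intro f₂ n h1 h2
    by_cases h0 : n = 0
    · subst h0; cases f₂ <;> simp [pvHexCharsGo]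
    · obtain ⟨f₂', rfl⟩ : ∃ k, f₂ = k + 1 := ⟨f₂ - 1, by omega⟩
      simp only [pvHexCharsGo, if_neg h0]
      congr 1
      exact ih f₂' (n / 16) (by omega) (by omega)

lemma pv_hexChars_unfold (n : Nat) (h : 0 < n) :
    pvHexChars n = pvHexChars (n / 16) ++ [pvHexDigit (n % 16)] := by
  unfold pvHexChars
  obtain ⟨m, rfl⟩ : ∃ m, n = m + 1 := ⟨n - 1, by omega⟩
  simp only [pvHexCharsGo, if_neg (by omega : ¬ m + 1 = 0)]
  congr 1
  exact pv_go_fuel m ((m + 1) / 16) ((m + 1) / 16) (by omega) le_rfl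

lemma pv_hexChars_ne_nil (n : Nat) (h : 0 < n) : pvHexChars n ≠ [] := by
  rw [pv_hexChars_unfold n h]
  simp

lemma pv_digit_ne_zero (m : Nat) (h0 : 0 < m) (h16 : m < 16) : pvHexDigit m ≠ '0' := by
  interval_cases m <;> decide

lemma pv_padHex_zero (k : Nat) : pvPadHex k 0 = List.replicate k '0' := by
  induction k with
  | zero => rfl
  | succ k ih =>
    show pvPadHex k (0 / 16) ++ [pvHexDigit (0 % 16)] = List.replicate (k + 1) '0'
    rw [List.replicate_succ', Nat.zero_div, ih]
    congr 1

lemma pv_dropWhile_replicate_zero (k : Nat) :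
    (List.replicate k '0').dropWhile (fun c => c == '0') = [] := by
  induction k with
  | zero => rfl
  | succ k ih => simpa [List.replicate_succ, List.dropWhile]

lemma pv_dropWhile_append_of_ne_nil {p : Char → Bool} (l₁ l₂ : List Char)
    (h : l₁.dropWhile p ≠ []) : (l₁ ++ l₂).dropWhile p = l₁.dropWhile p ++ l₂ := by
  induction l₁ with
  | nil => simp [List.dropWhile] at h
  | cons a t ih =>
    by_cases hp : p a
    · simp only [List.dropWhile_cons, hp, if_true] at h ⊢
      rw [List.cons_append, List.dropWhile_cons, if_pos hp]
      exact ih h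
    · simp [hp]

lemma pv_strip_pad : ∀ (k n : Nat), n < 16 ^ k → 0 < n →
    (pvPadHex k n).dropWhile (fun c => c == '0') = pvHexChars n := by
  intro k
  induction k with
  | zero => intro n h1 h2; omega
  | succ k ih =>
    intro n h1 h2
    simp only [pvPadHex]
    by_cases hq : n / 16 = 0
    · rw [hq, pv_padHex_zero]
      have hmod : n % 16 = n := Nat.mod_eq_of_lt (by omega)
      have hd := pv_digit_ne_zero (n % 16) (by omega) (by omega)
      rw [List.dropWhile_append]
      rw [pv_dropWhile_replicate_zero k]
      simp only [List.isEmpty_nil, if_true, List.dropWhile_cons]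
      rw [if_neg (by simpa using hd)]
      rw [pv_hexChars_unfold n h2, hq]
      simp [pvHexChars, pvHexCharsGo]
    · have hqlt : n / 16 < 16 ^ k := by
        have h16 : (16 : Nat) ^ (k + 1) = 16 ^ k * 16 := by ring
        rw [h16] at h1
        exact Nat.div_lt_of_lt_mul (by omega)
      have hih := ih (n / 16) hqlt (by omega)
      have hne : (pvPadHex k (n / 16)).dropWhile (fun c => c == '0') ≠ [] := by
        rw [hih]; exact pv_hexChars_ne_nil _ (by omega)
      rw [pv_dropWhile_append_of_ne_nil _ _ hne, hih, pv_hexChars_unfold n h2]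

-- pvPadHex splits at a digit boundary
lemma pv_padHex_split : ∀ (b a n : Nat),
    pvPadHex (a + b) n = pvPadHex a (n / 16 ^ b) ++ pvPadHex b (n % 16 ^ b) := by
  intro b
  induction b with
  | zero => intro a n; simp [pvPadHex]
  | succ b ih =>
    intro a n
    have h1 : a + (b + 1) = (a + b) + 1 := by omega
    rw [h1]
    simp only [pvPadHex]
    rw [ih a (n / 16)]
    have hdd : n / 16 / 16 ^ b = n / 16 ^ (b + 1) := by
      rw [Nat.div_div_eq_div_mul]
      congr 1
      ring
    have hmm : n % 16 ^ (b + 1) % 16 = n % 16 := by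
      apply Nat.mod_mod_of_dvd
      exact ⟨16 ^ b, by ring⟩
    have hmd : n % 16 ^ (b + 1) / 16 = n / 16 % 16 ^ b := by
      have : (16 : Nat) ^ (b + 1) = 16 * 16 ^ b := by ring
      rw [this, Nat.mod_mul_right_div_self]
    rw [hdd, hmm, hmd]
    simp

-- fixed-width hex of the packed value = concatenation of per-word 4-digit hex, reversed
lemma pv_packPad : ∀ (ms : List Nat), (∀ m ∈ ms, m < 65536) →
    pvPadHex (4 * ms.length) (packN ms) = (ms.reverse.map (pvPadHex 4)).flatten := by
  intro ms
  induction ms with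
  | nil => intro _; rfl
  | cons m t ih =>
    intro h
    have hm := h m (List.mem_cons_self)
    have hlen : 4 * (m :: t).length = 4 * t.length + 4 := by simp [List.length_cons]; ring
    rw [hlen, pv_padHex_split 4 (4 * t.length) (packN (m :: t))]
    have h164 : (16 : Nat) ^ 4 = 65536 := by norm_num
    have hdiv : packN (m :: t) / 16 ^ 4 = packN t := by
      simp only [packN, h164]
      rw [Nat.add_mul_div_left m (packN t) (by norm_num)]
      omega
    have hmod : packN (m :: t) % 16 ^ 4 = m := by
      simp only [packN, h164]
      rw [Nat.add_mul_mod_self_left]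
      exact Nat.mod_eq_of_lt hm
    rw [hdiv, hmod, ih (fun x hx => h x (List.mem_cons_of_mem _ hx))]
    simp [List.reverse_cons]

-- per-chunk equality of the two strings
lemma pv_chunk (L : List Int) (i : Int) (h0 : 0 ≤ i) (h16 : i.toNat + 16 ≤ L.length) :
    pvHex ((PySem.List.pyRange 0 16 1).foldl
      (fun combined j => PySem.Int.bor combined
        (PySem.List.pyGetD
          ((PySem.List.pyRange 0 16 1).foldl
            (fun vals idx =>
              let v := PySem.List.pyGetD L (i + idx) 0
              let vals := vals ++ [PySem.Int.band v 65535]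
              if v < 0 then vals.set idx.toNat (PySem.Int.band (Int.not (-v) + 1) 65535) else vals) [])
          j 0 <<< (16 * j).toNat)) 0)
    = String.ofList ('0' :: 'x' ::
        (if (List.dropWhile (fun c => c == '0') (List.flatten (List.map (fun v => pvFmt04x (PySem.Int.band v 65535)) (PySem.List.slice L (some i) (some (i + 16))).reverse))).isEmpty
         then ['0']
         else List.dropWhile (fun c => c == '0') (List.flatten (List.map (fun v => pvFmt04x (PySem.Int.band v 65535)) (PySem.List.slice L (some i) (some (i + 16))).reverse)))) := by
  have hzero : ((0 : Nat) : Int) = (0 : Int) := by norm_num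
  -- the chunk, by index
  have hslice : PySem.List.slice L (some i) (some (i + 16))
      = (PySem.List.pyRange 0 16 1).map (fun idx => PySem.List.pyGetD L (i + idx) 0) := by
    have h1 : (some i : Option Int) = some ((i.toNat : Nat) : Int) := by congr 1; omega
    have h2 : (some (i + 16) : Option Int) = some (((i.toNat + 16 : Nat)) : Int) := by congr 1; omega
    rw [h1, h2, PySem.List.slice_natCast]
    have h3 := pv_slice_chunk L i h0 h16 16 0 (by omega)
    rw [hzero] at h3
    rw [h3]
    norm_num
  -- A's vals list
  have hvals : (PySem.List.pyRange 0 16 1).foldl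
      (fun vals idx =>
        let v := PySem.List.pyGetD L (i + idx) 0
        let vals := vals ++ [PySem.Int.band v 65535]
        if v < 0 then vals.set idx.toNat (PySem.Int.band (Int.not (-v) + 1) 65535) else vals) []
      = (PySem.List.pyRange 0 16 1).map
          (fun idx => PySem.Int.band (PySem.List.pyGetD L (i + idx) 0) 65535) := by
    have := pv_innerA L i 16 0 [] (by omega) rfl
    rw [hzero] at this
    simp at this
    exact this
  set vals := (PySem.List.pyRange 0 16 1).map
      (fun idx => PySem.Int.band (PySem.List.pyGetD L (i + idx) 0) 65535) with hvdef
  have hlen : vals.length = 16 := by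
    rw [hvdef, List.length_map]
    rfl
  have hbounds : ∀ m ∈ vals, 0 ≤ m ∧ m < 65536 := by
    intro m hm
    rw [hvdef, List.mem_map] at hm
    obtain ⟨idx, _, rfl⟩ := hm
    exact pv_band_bounds _
  -- A-side value: packVal vals
  have hA : (PySem.List.pyRange 0 16 1).foldl
      (fun combined j => PySem.Int.bor combined (PySem.List.pyGetD vals j 0 <<< (16 * j).toNat)) 0
      = packVal vals := by
    have := pv_borfoldA vals hlen hbounds 16 0 0 (by omega) le_rfl (by norm_num)
    rw [hzero] at this
    simpa using this
  -- pass to Nat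
  set msN := vals.map Int.toNat with hmsN
  have hmsNlen : msN.length = 16 := by rw [hmsN, List.length_map, hlen]
  have hmsNb : ∀ m ∈ msN, m < 65536 := by
    intro m hm
    rw [hmsN, List.mem_map] at hm
    obtain ⟨v, hv, rfl⟩ := hm
    have := hbounds v hv
    omega
  have hpackN : packVal vals = ((packN msN : Nat) : Int) :=
    pv_packVal_toNat vals (fun m hm => (hbounds m hm).1)
  set N := packN msN with hN
  have hNlt : N < 16 ^ 64 := by
    have := pv_packN_lt msN hmsNb
    rw [hmsNlen] at this
    calc N < 65536 ^ 16 := this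
    _ = 16 ^ 64 := by norm_num
  -- B's digit buffer is the 64-digit fixed-width hex of N
  have hdigits : ((PySem.List.slice L (some i) (some (i + 16))).reverse.map
        (fun v => pvFmt04x (PySem.Int.band v 65535))).flatten = pvPadHex 64 N := by
    have hmapped : (PySem.List.slice L (some i) (some (i + 16))).map
        (fun v => pvFmt04x (PySem.Int.band v 65535)) = msN.map (pvPadHex 4) := by
      rw [hslice, hmsN, hvdef]
      simp only [List.map_map]
      rfl
    have hrev : (PySem.List.slice L (some i) (some (i + 16))).reverse.map
        (fun v => pvFmt04x (PySem.Int.band v 65535)) = msN.reverse.map (pvPadHex 4) := by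
      rw [List.map_reverse, hmapped, ← List.map_reverse]
    rw [hrev, ← pv_packPad msN hmsNb, hmsNlen, ← hN]
  rw [hvals, hA, hpackN, hdigits]
  unfold pvHex
  rw [Int.toNat_natCast]
  by_cases hN0 : N = 0
  · rw [hN0, pv_padHex_zero, pv_dropWhile_replicate_zero]
    simp
  · rw [pv_strip_pad 64 N hNlt (by omega)]
    have hne := pv_hexChars_ne_nil N (by omega)
    rw [if_neg hN0]
    simp [List.isEmpty_iff, hne]

-- ===== VERDICT (by name: the statement is the Claim_ definition above) =====
theorem generate_256bit_hex_strings_spec : Claim_equal_generate_256bit_hex_strings := by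
  unfold Claim_equal_generate_256bit_hex_strings
  intro values _
  unfold Spec_generate_256bit_hex_strings
  unfold generate_256bit_hex_strings generate_256bit_hex_strings_alt
  simp only []
  set L := pad16 values with hL
  rw [PySem.List.foldl_append_singleton_eq_map
    (f := fun i => pvHex ((PySem.List.pyRange 0 16 1).foldl
      (fun combined j => PySem.Int.bor combined
        (PySem.List.pyGetD
          ((PySem.List.pyRange 0 16 1).foldl
            (fun vals idx =>
              let v := PySem.List.pyGetD L (i + idx) 0
              let vals := vals ++ [PySem.Int.band v 65535]
              if v < 0 then vals.set idx.toNat (PySem.Int.band (Int.not (-v) + 1) 65535) else vals) [])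
          j 0 <<< (16 * j).toNat)) 0))]
  rw [List.nil_append]
  apply List.map_congr_left
  intro i hi
  have hmem := (PySem.List.mem_pyRange_iff_of_pos (a := 0) (b := (L.length : Int)) (s := 16)
    (by norm_num) i).mp hi
  have hmod := pv_pad16_mod values
  have h0 : 0 ≤ i := hmem.1
  have h16 : i.toNat + 16 ≤ L.length := by
    obtain ⟨_, hlt, hdvd⟩ := hmem
    rw [← hL] at hmod
    omega
  exact pv_chunk L i h0 h16
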